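-- pv_equiv track=rewrite | github.com/zebra0345/algorithm | 프로그래머스/4/68647. 짝수 행 세기/짝수 행 세기.py | solution
-- ===== SOURCE A (Python) =====
-- def solution(a):
--     MOD = 10**7 + 19
--     R = len(a)
--     C = len(a[0])
--
--
--     # 조합 미리 계산
--     comb = [[0] * (R+1) for _ in range(R+1)]
--     for i in range(R+1):
--         comb[i][0] = 1
--         for j in range(1, i+1):
--             comb[i][j] = (comb[i-1][j-1] + comb[i-1][j]) % MOD
--
--     # 각 열에 대해 1의 총 개수들을 구함
--     count = [0] * C
--     for r in range(R):
--         for c in range(C):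
--             if a[r][c] == 1:
--                 count[c] += 1
--
--
--     # i 번째 열까지 채웠을 때 1의 개수가 홀수인 행이 j개인 경우의 수
--     dp = [[0] * (R + 1) for _ in range(C+1)]
--     dp[0][0] = 1
--
--     for c in range(1, C+1):
--         # 현재 열에 배치해야할 1의 총 개수는 몇개인가
--         # 홀수개를 계산해놨으니 여기에서 체크
--         K = count[c-1]
--
--         for prev_odd in range(R+1):
--             if dp[c-1][prev_odd] == 0:
--                 continue
--
--             prev_even = R-prev_odd # 기존 짝수행의 갯수
--
--             # x : 기존 홀수행에 배치할 1의 개수(1을 더하면 짝수가 된다)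
--             # y : 기존 홀수행에 배치할 1의 개수(1을 더하면 홀수가 된다)
--
--             for x in range(K+1):
--                 y = K- x
--                 if x <= prev_odd and y <= prev_even:
--                     # 새롭게 갱신되는 홀수행의 개수 (기존 홀수 - 짝수로 변한거 + 홀수로 변한거)
--                     new_odd = prev_odd - x + y
--
--                     # 경우의 수 계산 (홀수행 중 x 개 선택) * (짝수 행 중 y 개 선택)
--                     ways = (comb[prev_odd][x] * comb[prev_even][y]) % MOD
--
--                     dp[c][new_odd] = (dp[c][new_odd] + dp[c-1][prev_odd] * ways) % MOD
--
--
--     return dp[C][0]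
-- ===== SOURCE B (Python) =====
-- def solution(a):
--     MOD = 10**7 + 19
--     R = len(a)
--     C = len(a[0])
--     n = R + 1
--
--     # Pascal's triangle built row by row with zip (ragged rows, no preallocated square table)
--     row = [1]
--     comb = [row]
--     for _ in range(R):
--         row = [(u + v) % MOD for u, v in zip([0] + row, row + [0])]
--         comb.append(row)
--
--     def ch(m, k):
--         return comb[m][k] if 0 <= k <= m else 0
--
--     # ones per column, computed column-wise
--     counts = [sum(1 for r in a if r[c] == 1) for c in range(C)]
--
--     # transfer matrix of one column holding K ones: entry [p][q] is the weight of
--     # going from p odd rows to q odd rows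
--     def transfer(K):
--         return [[sum(ch(p, x) * ch(R - p, K - x)
--                      for x in range(K + 1) if p - x + (K - x) == q) % MOD
--                  for q in range(n)]
--                 for p in range(n)]
--
--     def matmul(A, B):
--         return [[sum(A[i][k] * B[k][j] for k in range(n)) % MOD
--                  for j in range(n)]
--                 for i in range(n)]
--
--     def matpow(M, e):
--         P = [[1 if i == j else 0 for j in range(n)] for i in range(n)]
--         while e > 0:
--             if e % 2 == 1:
--                 P = matmul(P, M)
--             M = matmul(M, M)
--             e //= 2
--         return P
--
--     # fold the state vector through runs of equal column counts, each run
--     # handled at once by binary exponentiation of its transfer matrix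
--     v = [1] + [0] * R
--     i = 0
--     while i < C:
--         j = i
--         while j < C and counts[j] == counts[i]:
--             j += 1
--         P = matpow(transfer(counts[i]), j - i)
--         v = [sum(v[p] * P[p][q] for p in range(n)) % MOD for q in range(n)]
--         i = j
--     return v[0]
-- ===== Notes on version B (the rewrite author's own statement) =====
-- stated objective: alternative
-- what changed: B replaces A's column-by-column scatter DP over a (C+1)x(R+1) table with explicit (R+1)x(R+1) transfer matrices: consecutive columns with the same ones-count form a run processed at once by binary exponentiation (repeated squaring) of the run's transfer matrix followed by a vector-matrix product; Pascal rows are built by zip and column counts column-wise.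
import Mathlib
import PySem

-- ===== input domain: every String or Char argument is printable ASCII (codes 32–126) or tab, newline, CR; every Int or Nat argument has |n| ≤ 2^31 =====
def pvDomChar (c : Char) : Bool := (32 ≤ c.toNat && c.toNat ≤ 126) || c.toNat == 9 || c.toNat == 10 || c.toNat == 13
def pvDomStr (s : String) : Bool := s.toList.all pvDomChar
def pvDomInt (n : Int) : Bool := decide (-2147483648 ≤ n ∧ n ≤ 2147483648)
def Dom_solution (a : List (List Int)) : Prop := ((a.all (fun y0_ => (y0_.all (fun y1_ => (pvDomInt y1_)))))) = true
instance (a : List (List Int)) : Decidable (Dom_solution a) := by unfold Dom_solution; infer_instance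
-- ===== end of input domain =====

-- B replaces A's column-by-column scatter DP with explicit (R+1)×(R+1) transfer
-- matrices: consecutive columns with the same ones-count form a run handled at once by
-- binary exponentiation (repeated squaring) of that run's transfer matrix, then a
-- vector-matrix product; objective: alternative algorithm, not claimed faster.

-- ===== PORT A =====
-- t[i][j] read / write, as in the Python table accesses
def g2 (t : List (List Int)) (i j : Int) : Int :=
  PySem.List.pyGetD (PySem.List.pyGetD t i []) j 0

def s2 (t : List (List Int)) (i j v : Int) : List (List Int) :=
  PySem.List.pySetD t i (PySem.List.pySetD (PySem.List.pyGetD t i []) j v)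

def combALoop (M R : Int) : List (List Int) :=
  (PySem.List.pyRange 0 (R+1) 1).foldl (fun cb i =>
    let cb1 := s2 cb i 0 1
    (PySem.List.pyRange 1 (i+1) 1).foldl (fun cb2 j =>
      s2 cb2 i j (PySem.Int.mod (g2 cb2 (i-1) (j-1) + g2 cb2 (i-1) j) M)) cb1)
    ((PySem.List.pyRange 0 (R+1) 1).map (fun _ => List.replicate (R+1).toNat (0:Int)))

def cntALoop (a : List (List Int)) (R C : Int) : List Int :=
  (PySem.List.pyRange 0 R 1).foldl (fun cnt r =>
    (PySem.List.pyRange 0 C 1).foldl (fun cnt2 c =>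
      if g2 a r c == 1 then PySem.List.pySetD cnt2 c (PySem.List.pyGetD cnt2 c 0 + 1)
      else cnt2) cnt)
    (List.replicate C.toNat (0:Int))

def dpALoop (M R C : Int) (comb : List (List Int)) (cnt : List Int) : List (List Int) :=
  (PySem.List.pyRange 1 (C+1) 1).foldl (fun dp c =>
    let K := PySem.List.pyGetD cnt (c-1) 0
    (PySem.List.pyRange 0 (R+1) 1).foldl (fun dp2 po =>
      if g2 dp2 (c-1) po == 0 then dp2
      else
        let pe := R - po
        (PySem.List.pyRange 0 (K+1) 1).foldl (fun dp3 x =>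
          let y := K - x
          if x ≤ po ∧ y ≤ pe then
            let no := po - x + y
            let ways := PySem.Int.mod (g2 comb po x * g2 comb pe y) M
            s2 dp3 c no (PySem.Int.mod (g2 dp3 c no + g2 dp3 (c-1) po * ways) M)
          else dp3) dp2) dp)
    (s2 ((PySem.List.pyRange 0 (C+1) 1).map (fun _ => List.replicate (R+1).toNat (0:Int))) 0 0 1)

def solution (a : List (List Int)) : Int :=
  let M : Int := 10 ^ 7 + 19
  let R : Int := (a.length : Int)
  let C : Int := ((PySem.List.pyGetD a 0 []).length : Int)
  g2 (dpALoop M R C (combALoop M R) (cntALoop a R C)) C 0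

-- ===== PORT B =====
def combBLoop (M R : Int) : List (List Int) :=
  ((PySem.List.pyRange 0 R 1).foldl (fun (st : List Int × List (List Int)) _ =>
    let row := (List.zip ((0:Int) :: st.1) (st.1 ++ [0])).map (fun uv => PySem.Int.mod (uv.1 + uv.2) M)
    (row, st.2 ++ [row])) ([1], [[1]])).2

def chB (comb : List (List Int)) (n k : Int) : Int :=
  if 0 ≤ k ∧ k ≤ n then PySem.List.pyGetD (PySem.List.pyGetD comb n []) k 0 else 0

def cntBList (a : List (List Int)) (C : Int) : List Int :=
  (PySem.List.pyRange 0 C 1).map (fun c =>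
    (a.map (fun r => if PySem.List.pyGetD r c 0 == 1 then (1:Int) else 0)).sum)

-- transfer matrix of one column with K ones; python's generator filter 'if p-x+(K-x)==q'
-- is the List.filter; indices from range(n) are nonnegative and in range, so plain getD
-- below (in matmulB/vecmulB) is exact for python's v[p], P[p][q]
def transferB (comb : List (List Int)) (md R : Int) (n : Nat) (K : Int) : List (List Int) :=
  (List.range n).map (fun (p : Nat) =>
    (List.range n).map (fun (q : Nat) =>
      PySem.Int.mod (((PySem.List.pyRange 0 (K+1) 1).filter
          (fun x => (p:Int) - x + (K - x) == (q:Int))).map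
        (fun x => chB comb (p:Int) x * chB comb (R - (p:Int)) (K - x))).sum md))

def matmulB (n : Nat) (md : Int) (A B : List (List Int)) : List (List Int) :=
  (List.range n).map (fun i => (List.range n).map (fun j =>
    PySem.Int.mod (((List.range n).map (fun k =>
      (A.getD i []).getD k 0 * ((B.getD k []).getD j 0))).sum) md))

def idMatB (n : Nat) : List (List Int) :=
  (List.range n).map (fun i => (List.range n).map (fun j => if i = j then (1:Int) else 0))

-- python's while-loop over e with e //= 2, transcribed as recursion on e
def matpowB (n : Nat) (md : Int) (M P : List (List Int)) (e : Nat) : List (List Int) :=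
  if e = 0 then P
  else matpowB n md (matmulB n md M M) (if e % 2 = 1 then matmulB n md P M else P) (e / 2)
termination_by e
decreasing_by omega

def vecmulB (n : Nat) (md : Int) (v : List Int) (P : List (List Int)) : List Int :=
  (List.range n).map (fun q => PySem.Int.mod (((List.range n).map (fun p =>
    v.getD p 0 * ((P.getD p []).getD q 0))).sum) md)

-- python's outer index scan 'while j < C and counts[j] == counts[i]' is exactly
-- takeWhile / dropWhile on the remaining counts
def runLoopB (n : Nat) (md R : Int) (comb : List (List Int)) (v : List Int) (counts : List Int) : List Int :=
  match counts with
  | [] => v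
  | K :: rest =>
    runLoopB n md R comb
      (vecmulB n md v (matpowB n md (transferB comb md R n K) (idMatB n)
        ((K :: rest).takeWhile (fun x => x == K)).length))
      ((K :: rest).dropWhile (fun x => x == K))
termination_by counts.length
decreasing_by
  simp only [List.dropWhile_cons, BEq.rfl, if_pos]
  exact Nat.lt_succ_of_le (List.length_dropWhile_le _ _)

def solution_alt (a : List (List Int)) : Int :=
  let md : Int := 10 ^ 7 + 19
  let R : Int := (a.length : Int)
  let C : Int := ((PySem.List.pyGetD a 0 []).length : Int)
  let n : Nat := a.length + 1        -- python: n = R + 1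
  PySem.List.pyGetD
    (runLoopB n md R (combBLoop md R) ((1:Int) :: List.replicate a.length 0) (cntBList a C)) 0 0

-- ===== PRECONDITION & SPEC =====
-- Pre_ excludes exactly the inputs on which A raises IndexError: the empty list (a[0])
-- and matrices where some row is shorter than the first row (a[r][c] out of range).
def Pre_solution (a : List (List Int)) : Prop :=
  a ≠ [] ∧ ∀ r ∈ a, (a.headD []).length ≤ r.length
instance (a : List (List Int)) : Decidable (Pre_solution a) := by unfold Pre_solution; infer_instance

def pvWitness_solution : List (List Int) := [[1, 0], [0, 1]]

def Spec_solution (a : List (List Int)) (out : Int) : Prop := out = solution_alt a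
instance (a : List (List Int)) (out : Int) : Decidable (Spec_solution a out) := by unfold Spec_solution; infer_instance

-- ===== CLAIM (what is proved, stated in full; the proofs are below) =====
def Claim_equal_solution : Prop := ∀ (a : List (List Int)), Dom_solution a → Pre_solution a → Spec_solution a (solution a)

-- ===== LEMMAS AND PROOFS =====

-- the common mathematical spec both ports are reduced to
def MD : Int := 10 ^ 7 + 19

def chS (n k : Nat) : Int := ((n.choose k : Nat) : Int) % MD

def chG (n k : Int) : Int := if 0 ≤ k ∧ k ≤ n then chS n.toNat k.toNat else 0

def pullT (R : Nat) (dpf : Nat → Int) (K : Int) (j p : Nat) : Int :=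
  if ((p : Int) + K - (j : Int)) % 2 = 0 then
    dpf p * chG (p : Int) (((p : Int) + K - (j : Int)) / 2)
          * chG ((R : Int) - (p : Int)) (K - ((p : Int) + K - (j : Int)) / 2)
  else 0

def pullRow (R : Nat) (dpf : Nat → Int) (K : Int) (j : Nat) : Int :=
  (((List.range (R+1)).map (fun p => pullT R dpf K j p)).sum) % MD

def dpIter (R : Nat) (Ks : List Int) : Nat → Int :=
  Ks.foldl (fun dpf K => pullRow R dpf K) (fun j => if j = 0 then 1 else 0)

def cS (a : List (List Int)) (c : Nat) : Int :=
  (a.map (fun r => if r.getD c 0 == 1 then (1:Int) else 0)).sum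

def cntS (a : List (List Int)) : List Int :=
  (List.range (a.headD []).length).map (fun c => cS a c)

-- generic toolkit -------------------------------------------------------------

theorem mget {α : Type} (g : Nat → α) (n : Nat) (i : Int) (d : α)
    (h0 : 0 ≤ i) (h1 : i < (n : Int)) :
    PySem.List.pyGetD ((List.range n).map g) i d = g i.toNat := by
  rw [PySem.List.pyGetD_eq_getElem _ d h0 (by simpa using h1)]
  simp

theorem mset {α : Type} (g : Nat → α) (n : Nat) (i : Int) (v : α)
    (h0 : 0 ≤ i) (h1 : i < (n : Int)) :
    PySem.List.pySetD ((List.range n).map g) i v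
      = (List.range n).map (fun j => if j = i.toNat then v else g j) := by
  rw [PySem.List.pySetD_of_nonneg _ v h0]
  apply List.ext_getElem (by simp)
  intro k hk hk'
  simp only [List.getElem_set, List.getElem_map, List.getElem_range]
  by_cases hik : i.toNat = k
  · simp [hik]
  · rw [if_neg hik, if_neg (fun h => hik h.symm)]

theorem set_self {α : Type} (xs : List α) (i : Int) (d : α)
    (h0 : 0 ≤ i) (h1 : i < (xs.length : Int)) :
    PySem.List.pySetD xs i (PySem.List.pyGetD xs i d) = xs := by
  rw [PySem.List.pySetD_of_nonneg _ _ h0,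
      PySem.List.pyGetD_eq_getElem _ d h0 h1]
  exact List.set_getElem_self (by omega)

theorem getD_setD_int {α : Type} (xs : List α) (i m : Int) (v d : α)
    (h0 : 0 ≤ i) (h1 : i < (xs.length : Int)) (hm0 : 0 ≤ m) (hm1 : m < (xs.length : Int)) :
    PySem.List.pyGetD (PySem.List.pySetD xs i v) m d
      = if m = i then v else PySem.List.pyGetD xs m d := by
  have hi : i = ((i.toNat : Nat) : Int) := by omega
  have hm : m = ((m.toNat : Nat) : Int) := by omega
  rw [hi, hm, PySem.List.pyGetD_pySetD_natCast xs i.toNat m.toNat v d (by omega)]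
  by_cases h : m.toNat = i.toNat
  · rw [if_pos h, if_pos (by omega)]
  · rw [if_neg h, if_neg (by omega)]

theorem setD_setD {α : Type} (xs : List α) (i : Int) (v w : α) (h0 : 0 ≤ i) :
    PySem.List.pySetD (PySem.List.pySetD xs i v) i w = PySem.List.pySetD xs i w := by
  rw [PySem.List.pySetD_of_nonneg _ v h0, PySem.List.pySetD_of_nonneg _ w h0,
      PySem.List.pySetD_of_nonneg _ w h0, List.set_set]

theorem len_setD {α : Type} (xs : List α) (i : Int) (v : α) (h0 : 0 ≤ i) :
    (PySem.List.pySetD xs i v).length = xs.length := by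
  rw [PySem.List.pySetD_of_nonneg _ v h0]; simp

theorem pyRange0 (n : Nat) :
    PySem.List.pyRange 0 (n : Int) 1 = (List.range n).map (fun k : Nat => (k : Int)) := by
  have h : ((n : Int) - 0).toNat = n := by omega
  rw [PySem.List.pyRange_one, h]
  apply List.map_congr_left
  intro k _
  omega

theorem addl (h v M : Int) : (h % M + v) % M = (h + v) % M := by
  conv_rhs => rw [Int.add_emod]
  rw [Int.add_emod (h % M), Int.emod_emod_of_dvd _ dvd_rfl]

theorem mull (u v M : Int) : (u * (v % M)) % M = (u * v) % M := by
  conv_rhs => rw [Int.mul_emod]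
  rw [Int.mul_emod u (v % M), Int.emod_emod_of_dvd _ dvd_rfl]

theorem mulr (u v M : Int) : ((u % M) * v) % M = (u * v) % M := by
  conv_rhs => rw [Int.mul_emod]
  rw [Int.mul_emod (u % M) v, Int.emod_emod_of_dvd _ dvd_rfl]

theorem sum_mod_congr {α : Type} (l : List α) (f g : α → Int) (M : Int)
    (h : ∀ x ∈ l, f x % M = g x % M) :
    ((l.map f).sum) % M = ((l.map g).sum) % M := by
  induction l with
  | nil => rfl
  | cons x t ih =>
      simp only [List.map_cons, List.sum_cons]
      rw [Int.add_emod, h x (by simp), ih (fun y hy => h y (by simp [hy])),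
        ← Int.add_emod]

theorem sum_filter_unique (l : List Int) (q : Int → Bool) (v : Int → Int) (x0 : Int)
    (hnd : l.Nodup) (huniq : ∀ x ∈ l, q x = true → x = x0) :
    (((l.filter q).map v).sum) = if x0 ∈ l ∧ q x0 = true then v x0 else 0 := by
  induction l with
  | nil => simp
  | cons x t ih =>
      simp only [List.nodup_cons] at hnd
      have ihv := ih hnd.2 (fun y hy hqy => huniq y (by simp [hy]) hqy)
      by_cases hq : q x = true
      · have hx0 : x = x0 := huniq x (by simp) hq
        rw [List.filter_cons_of_pos hq]
        simp only [List.map_cons, List.sum_cons, ihv]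
        have hnot : ¬ (x0 ∈ t ∧ q x0 = true) := fun hmem => hnd.1 (hx0 ▸ hmem.1)
        rw [if_neg hnot, if_pos ⟨by simp [hx0], hx0 ▸ hq⟩, hx0]
        ring
      · rw [List.filter_cons_of_neg (by simpa using hq), ihv]
        apply if_congr _ rfl rfl
        constructor
        · rintro ⟨h1, h2⟩; exact ⟨by simp [h1], h2⟩
        · rintro ⟨h1, h2⟩
          rcases List.mem_cons.1 h1 with h | h
          · exact absurd (h ▸ h2) (by simp [hq])
          · exact ⟨h, h2⟩

theorem getD_map_range {α : Type} (f : Nat → α) (n p : Nat) (d : α) (hp : p < n) :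
    ((List.range n).map f).getD p d = f p := by
  rw [List.getD_eq_getElem?_getD, List.getElem?_map, List.getElem?_range hp]
  rfl

theorem lsum_finset (n : Nat) (f : Nat → Int) :
    ((List.range n).map f).sum = ∑ i ∈ Finset.range n, f i := by
  induction n with
  | zero => simp
  | succ m ih => simp [List.range_succ, Finset.sum_range_succ, ih]

theorem sum_swap_range (n m : Nat) (F : Nat → Nat → Int) :
    ((List.range n).map (fun p => ((List.range m).map (fun k => F p k)).sum)).sum
      = ((List.range m).map (fun k => ((List.range n).map (fun p => F p k)).sum)).sum := by
  simp only [lsum_finset]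
  exact Finset.sum_comm

theorem sum_range_delta (n q : Nat) (f : Nat → Int) (hq : q < n) :
    ((List.range n).map (fun p => if p = q then f p else 0)).sum = f q := by
  induction n with
  | zero => omega
  | succ m ih =>
      rw [List.range_succ, List.map_append, List.sum_append]
      by_cases hqm : q = m
      · subst hqm
        have hz : ((List.range q).map (fun p => if p = q then f p else 0)).sum = 0 := by
          apply List.sum_eq_zero
          intro y hy
          rcases List.mem_map.1 hy with ⟨p, hp, rfl⟩
          simp only [List.mem_range] at hp
          rw [if_neg (by omega)]
        simp [hz]
      · rw [ih (by omega)]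
        have hm : (¬ m = q) := fun h => hqm h.symm
        simp [hm]

-- B-side ----------------------------------------------------------------------

theorem MD_pos : (0:Int) < MD := by norm_num [MD]

theorem chS_zero (n : Nat) : chS n 0 = 1 := by
  norm_num [chS, MD]

theorem chS_high (n k : Nat) (h : n < k) : chS n k = 0 := by
  simp [chS, Nat.choose_eq_zero_of_lt h]

theorem chS_pascal (n k : Nat) : (chS n k + chS n (k+1)) % MD = chS (n+1) (k+1) := by
  unfold chS
  rw [← Int.add_emod, Nat.choose_succ_succ (n := n) (k := k)]
  push_cast
  simp [Nat.succ_eq_add_one, Nat.add_comm]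

theorem init_vec (r : Nat) :
    ((1:Int) :: List.replicate r 0)
      = (List.range (r+1)).map (fun j => if j = 0 then (1:Int) else 0) := by
  apply List.ext_getElem (by simp)
  intro k hk hk'
  cases k with
  | zero => simp
  | succ s =>
      simp only [List.length_cons, List.length_replicate] at hk
      simp [List.getElem_replicate]

theorem zipstep (n : Nat) :
    (List.zip ((0:Int) :: (List.range (n+1)).map (fun k => chS n k))
              ((List.range (n+1)).map (fun k => chS n k) ++ [0])).map
        (fun uv => PySem.Int.mod (uv.1 + uv.2) MD)
      = (List.range (n+2)).map (fun k => chS (n+1) k) := by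
  apply List.ext_getElem (by simp)
  intro k hk hk'
  simp only [List.getElem_map, List.getElem_zip]
  rw [PySem.Int.mod_eq_emod_of_pos MD_pos]
  cases k with
  | zero =>
      simp [chS_zero]
      norm_num [chS, MD]
  | succ s =>
      simp only [List.length_map, List.length_range] at hk'
      have hs : s < n + 1 := by omega
      have h1 : (((0:Int) :: (List.range (n+1)).map (fun k => chS n k))[s+1]'(by simp; omega))
          = chS n s := by simp [hs]
      have h2 : (((List.range (n+1)).map (fun k => chS n k) ++ [0])[s+1]'(by simp; omega))
          = chS n (s+1) := by
        by_cases hsn : s + 1 < n + 1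
        · rw [List.getElem_append_left (by simpa using hsn)]
          simp [hsn]
        · have hse : s = n := by omega
          rw [List.getElem_append_right (by simp; omega)]
          simp [hse, chS_high n (n+1) (by omega)]
      rw [h1, h2]
      simp [chS_pascal n s]

def pascalTable (r : Nat) : List (List Int) :=
  (List.range (r+1)).map (fun i => (List.range (i+1)).map (fun k => chS i k))

theorem combB_fold (r : Nat) :
    (List.range r).foldl (fun (st : List Int × List (List Int)) (_ : Nat) =>
        let row := (List.zip ((0:Int) :: st.1) (st.1 ++ [0])).map
          (fun uv => PySem.Int.mod (uv.1 + uv.2) MD)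
        (row, st.2 ++ [row])) ([1], [[1]])
      = ((List.range (r+1)).map (fun k => chS r k), pascalTable r) := by
  induction r with
  | zero =>
      simp only [List.range_zero, List.foldl_nil, pascalTable]
      norm_num [chS, MD]
  | succ m ih =>
      rw [List.range_succ, List.foldl_append, ih, List.foldl_cons, List.foldl_nil]
      simp only [zipstep m]
      have hpt : pascalTable (m+1) = pascalTable m ++ [(List.range (m+2)).map (fun k => chS (m+1) k)] := by
        simp [pascalTable, List.range_succ]
      rw [hpt]

theorem combB_spec (r : Nat) : combBLoop MD (r : Int) = pascalTable r := by
  unfold combBLoop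
  rw [pyRange0 r, List.foldl_map, combB_fold r]

theorem chB_eq (r : Nat) (n k : Int) (h0 : 0 ≤ n) (h1 : n ≤ (r : Int)) :
    chB (pascalTable r) n k = chG n k := by
  unfold chB chG
  by_cases h : 0 ≤ k ∧ k ≤ n
  · rw [if_pos h, if_pos h, pascalTable,
      mget _ (r+1) n [] h0 (by push_cast; omega),
      mget _ (n.toNat+1) k 0 h.1 (by push_cast; omega)]
  · rw [if_neg h, if_neg h]

-- matrix shapes: every matrix B builds is an image of List.range
def MatF (n : Nat) (f : Nat → Nat → Int) : List (List Int) :=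
  (List.range n).map (fun i => (List.range n).map (f i))

theorem mmF (n : Nat) (f h : Nat → Nat → Int) :
    matmulB n MD (MatF n f) (MatF n h)
      = MatF n (fun i j => (((List.range n).map (fun k => f i k * h k j)).sum) % MD) := by
  unfold matmulB MatF
  apply List.map_congr_left
  intro i hi
  simp only [List.mem_range] at hi
  apply List.map_congr_left
  intro j hj
  simp only [List.mem_range] at hj
  rw [PySem.Int.mod_eq_emod_of_pos MD_pos]
  congr 1
  congr 1
  apply List.map_congr_left
  intro k hk
  simp only [List.mem_range] at hk
  rw [getD_map_range _ n i [] hi, getD_map_range _ n k (0:Int) hk,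
    getD_map_range _ n k [] hk, getD_map_range _ n j (0:Int) hj]

theorem vmF (n : Nat) (g : Nat → Int) (f : Nat → Nat → Int) :
    vecmulB n MD ((List.range n).map g) (MatF n f)
      = (List.range n).map (fun q => (((List.range n).map (fun p => g p * f p q)).sum) % MD) := by
  unfold vecmulB MatF
  apply List.map_congr_left
  intro q hq
  simp only [List.mem_range] at hq
  rw [PySem.Int.mod_eq_emod_of_pos MD_pos]
  congr 1
  congr 1
  apply List.map_congr_left
  intro p hp
  simp only [List.mem_range] at hp
  rw [getD_map_range _ n p (0:Int) hp, getD_map_range _ n p [] hp,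
    getD_map_range _ n q (0:Int) hq]

theorem vid (n : Nat) (g : Nat → Int) (hg : ∀ p, g p % MD = g p) :
    vecmulB n MD ((List.range n).map g) (idMatB n) = (List.range n).map g := by
  have hid : idMatB n = MatF n (fun i j => if i = j then (1:Int) else 0) := rfl
  rw [hid, vmF]
  apply List.map_congr_left
  intro q hq
  simp only [List.mem_range] at hq
  have he : ((List.range n).map (fun p => g p * if p = q then (1:Int) else 0))
      = (List.range n).map (fun p => if p = q then g p else 0) := by
    apply List.map_congr_left
    intro p _
    by_cases h : p = q
    · simp [h]
    · simp [h]
  rw [he, sum_range_delta n q g hq, hg q]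

-- the vector–matrix associativity mod MD that binary exponentiation rests on
theorem VA (n : Nat) (g : Nat → Int) (f h : Nat → Nat → Int) :
    vecmulB n MD (vecmulB n MD ((List.range n).map g) (MatF n f)) (MatF n h)
      = vecmulB n MD ((List.range n).map g) (matmulB n MD (MatF n f) (MatF n h)) := by
  rw [vmF, mmF, vmF, vmF]
  apply List.map_congr_left
  intro q hq
  have hL : (((List.range n).map (fun k =>
        ((((List.range n).map (fun p => g p * f p k)).sum) % MD) * h k q)).sum) % MD
      = (((List.range n).map (fun k =>
          ((List.range n).map (fun p => g p * f p k * h k q)).sum)).sum) % MD := by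
    apply sum_mod_congr
    intro k _
    rw [mulr, ← List.sum_map_mul_right]
  have hR : (((List.range n).map (fun p =>
        g p * ((((List.range n).map (fun k => f p k * h k q)).sum) % MD))).sum) % MD
      = (((List.range n).map (fun p =>
          ((List.range n).map (fun k => g p * f p k * h k q)).sum)).sum) % MD := by
    apply sum_mod_congr
    intro p _
    rw [mull, ← List.sum_map_mul_left]
    congr 1
    congr 1
    apply List.map_congr_left
    intro k _
    rw [mul_assoc]
  rw [hL, hR, sum_swap_range n n (fun k p => g p * f p k * h k q)]

def applyPowV (n : Nat) (T : List (List Int)) : List Int → Nat → List Int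
  | w, 0 => w
  | w, e+1 => applyPowV n T (vecmulB n MD w T) e

theorem apD (n : Nat) (F : Nat → Nat → Int) (k : Nat) :
    ∀ (g : Nat → Int),
    applyPowV n (matmulB n MD (MatF n F) (MatF n F)) ((List.range n).map g) k
      = applyPowV n (MatF n F) ((List.range n).map g) (2*k) := by
  induction k with
  | zero => intro g; rfl
  | succ m ih =>
      intro g
      have hstep : vecmulB n MD ((List.range n).map g) (matmulB n MD (MatF n F) (MatF n F))
          = vecmulB n MD (vecmulB n MD ((List.range n).map g) (MatF n F)) (MatF n F) :=
        (VA n g F F).symm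
      show applyPowV n (matmulB n MD (MatF n F) (MatF n F))
          (vecmulB n MD ((List.range n).map g) (matmulB n MD (MatF n F) (MatF n F))) m = _
      rw [hstep, vmF]
      set g1 : Nat → Int := fun q => (((List.range n).map (fun p => g p * F p q)).sum) % MD with hg1
      have hv1 : vecmulB n MD ((List.range n).map g) (MatF n F) = (List.range n).map g1 := by
        rw [vmF]
      rw [show vecmulB n MD ((List.range n).map g1) (MatF n F)
            = vecmulB n MD ((List.range n).map g1) (MatF n F) from rfl]
      have := ih (fun q => (((List.range n).map (fun p => g1 p * F p q)).sum) % MD)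
      rw [show ((List.range n).map fun q => (((List.range n).map (fun p => g1 p * F p q)).sum) % MD)
            = vecmulB n MD ((List.range n).map g1) (MatF n F) from (vmF n g1 F).symm] at this
      rw [this]
      have h2 : 2 * (m + 1) = (2 * m) + 1 + 1 := by omega
      rw [h2]
      show _ = applyPowV n (MatF n F)
        (vecmulB n MD (vecmulB n MD ((List.range n).map g) (MatF n F)) (MatF n F)) (2*m)
      rw [hv1]

theorem apPow (n : Nat) : ∀ (e : Nat) (g : Nat → Int) (F P : Nat → Nat → Int),
    vecmulB n MD ((List.range n).map g) (matpowB n MD (MatF n F) (MatF n P) e)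
      = applyPowV n (MatF n F) (vecmulB n MD ((List.range n).map g) (MatF n P)) e := by
  intro e
  induction e using Nat.strong_induction_on with
  | _ e ih =>
      intro g F P
      by_cases he : e = 0
      · subst he
        rw [matpowB]
        rfl
      · rw [matpowB, if_neg he]
        have hMM : matmulB n MD (MatF n F) (MatF n F)
            = MatF n (fun i j => (((List.range n).map (fun k => F i k * F k j)).sum) % MD) := mmF n F F
        by_cases hodd : e % 2 = 1
        · rw [if_pos hodd]
          have hPM : matmulB n MD (MatF n P) (MatF n F)
              = MatF n (fun i j => (((List.range n).map (fun k => P i k * F k j)).sum) % MD) := mmF n P F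
          rw [hMM, hPM, ih (e/2) (by omega) g _ _, ← hMM, ← hPM]
          have hw : vecmulB n MD ((List.range n).map g) (matmulB n MD (MatF n P) (MatF n F))
              = vecmulB n MD (vecmulB n MD ((List.range n).map g) (MatF n P)) (MatF n F) :=
            (VA n g P F).symm
          rw [hw]
          have hv1 : vecmulB n MD ((List.range n).map g) (MatF n P)
              = (List.range n).map (fun q => (((List.range n).map (fun p => g p * P p q)).sum) % MD) := vmF n g P
          rw [hv1, vmF n _ F, apD n F (e/2) _]
          have he2 : e = 2 * (e/2) + 1 := by omega
          conv_rhs => rw [he2]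
          rw [show applyPowV n (MatF n F)
                ((List.range n).map (fun q => (((List.range n).map (fun p => g p * P p q)).sum) % MD))
                (2 * (e/2) + 1)
              = applyPowV n (MatF n F)
                (vecmulB n MD ((List.range n).map (fun q => (((List.range n).map (fun p => g p * P p q)).sum) % MD)) (MatF n F))
                (2 * (e/2)) from rfl,
            vmF n _ F]
        · rw [if_neg hodd]
          rw [hMM, ih (e/2) (by omega) g _ _, ← hMM]
          have hv1 : vecmulB n MD ((List.range n).map g) (MatF n P)
              = (List.range n).map (fun q => (((List.range n).map (fun p => g p * P p q)).sum) % MD) := vmF n g P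
          rw [hv1, apD n F (e/2) _]
          have he2 : e = 2 * (e/2) := by omega
          rw [← he2]

-- the inner filtered sum of a transfer entry has at most one surviving x
theorem TC (r : Nat) (K : Int) (p j : Nat) (hp : p ≤ r) :
    ((((PySem.List.pyRange 0 (K+1) 1).filter
          (fun x => (p:Int) - x + (K - x) == (j:Int))).map
        (fun x => chB (pascalTable r) (p:Int) x * chB (pascalTable r) ((r:Int) - (p:Int)) (K - x))).sum) % MD
      = pullT r (fun _ => 1) K j p % MD := by
  unfold pullT
  by_cases hev : ((p : Int) + K - (j : Int)) % 2 = 0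
  · have h2x : 2 * (((p : Int) + K - (j : Int)) / 2) = (p : Int) + K - (j : Int) := by omega
    rw [sum_filter_unique _ _ _ (((p : Int) + K - (j : Int)) / 2)
      (PySem.List.nodup_pyRange_one 0 (K+1))
      (fun x _ hq => by
        simp only [beq_iff_eq] at hq
        omega)]
    rw [if_pos hev, one_mul]
    by_cases hc : ((p : Int) + K - (j : Int)) / 2 ∈ PySem.List.pyRange 0 (K+1) 1
        ∧ ((fun x => (p:Int) - x + (K - x) == (j:Int)) (((p : Int) + K - (j : Int)) / 2)) = true
    · rw [if_pos hc]
      obtain ⟨hmem, _⟩ := hc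
      rcases PySem.List.mem_pyRange_one.1 hmem with ⟨hx0, hx1⟩
      rw [chB_eq r _ _ (by omega) (by omega), chB_eq r _ _ (by omega) (by omega)]
    · rw [if_neg hc]
      set x0 : Int := ((p : Int) + K - (j : Int)) / 2 with hx0def
      have hout : ¬ (0 ≤ x0 ∧ x0 < K + 1) := by
        intro hin
        exact hc ⟨PySem.List.mem_pyRange_one.2 ⟨hin.1, by omega⟩, by
          simp only [beq_iff_eq]; omega⟩
      by_cases h1 : 0 ≤ x0
      · have hbig : ¬ x0 < K + 1 := fun hlt => hout ⟨h1, hlt⟩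
        rw [show chG ((r:Int) - (p:Int)) (K - x0) = 0 from by
          unfold chG; rw [if_neg (fun hh => by omega)]]
        rw [mul_zero]
      · rw [show chG (p:Int) x0 = 0 from by
          unfold chG; rw [if_neg (fun hh => h1 hh.1)]]
        rw [zero_mul]
  · rw [if_neg hev]
    rw [List.filter_eq_nil_iff.2 (fun x hx => by
      simp only [beq_iff_eq]
      intro hEq
      omega)]
    rw [List.map_nil, List.sum_nil]

-- one transfer-matrix application is one pullRow step
def tFun (r : Nat) (K : Int) (p q : Nat) : Int :=
  PySem.Int.mod (((PySem.List.pyRange 0 (K+1) 1).filter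
      (fun x => (p:Int) - x + (K - x) == (q:Int))).map
    (fun x => chB (pascalTable r) (p:Int) x
      * chB (pascalTable r) ((r:Int) - (p:Int)) (K - x))).sum MD

theorem tFun_spec (r : Nat) (K : Int) :
    transferB (pascalTable r) MD (r:Int) (r+1) K = MatF (r+1) (tFun r K) := rfl

theorem idF_spec (n : Nat) :
    idMatB n = MatF n (fun i j => if i = j then (1:Int) else 0) := rfl

theorem stepT (r : Nat) (K : Int) (dpf : Nat → Int) :
    vecmulB (r+1) MD ((List.range (r+1)).map dpf)
        (transferB (pascalTable r) MD (r:Int) (r+1) K)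
      = (List.range (r+1)).map (fun j => pullRow r dpf K j) := by
  rw [tFun_spec, vmF]
  apply List.map_congr_left
  intro q hq
  simp only [List.mem_range] at hq
  unfold pullRow
  apply sum_mod_congr
  intro p hp
  simp only [List.mem_range] at hp
  unfold tFun
  rw [PySem.Int.mod_eq_emod_of_pos MD_pos, TC r K p q (by omega), mull]
  congr 1
  unfold pullT
  by_cases hev : ((p : Int) + K - (q : Int)) % 2 = 0
  · rw [if_pos hev, if_pos hev]
    ring
  · rw [if_neg hev, if_neg hev, mul_zero]

theorem apStep (r : Nat) (K : Int) (e : Nat) :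
    ∀ (dpf : Nat → Int),
    applyPowV (r+1) (transferB (pascalTable r) MD (r:Int) (r+1) K)
        ((List.range (r+1)).map dpf) e
      = (List.range (r+1)).map ((List.replicate e K).foldl (fun f K' => pullRow r f K') dpf) := by
  induction e with
  | zero => intro dpf; rfl
  | succ m ih =>
      intro dpf
      show applyPowV (r+1) _ (vecmulB (r+1) MD ((List.range (r+1)).map dpf) _) m = _
      rw [stepT r K dpf, ih (fun j => pullRow r dpf K j)]
      rw [List.replicate_succ, List.foldl_cons]

theorem pullRow_red (r : Nat) (dpf : Nat → Int) (K : Int) (j : Nat) :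
    pullRow r dpf K j % MD = pullRow r dpf K j := by
  unfold pullRow
  exact Int.emod_emod_of_dvd _ dvd_rfl

theorem fold_red (r : Nat) (l : List Int) : ∀ (dpf : Nat → Int),
    (∀ p, dpf p % MD = dpf p) →
    ∀ p, (l.foldl (fun f K' => pullRow r f K') dpf) p % MD
        = (l.foldl (fun f K' => pullRow r f K') dpf) p := by
  induction l with
  | nil => intro dpf h p; exact h p
  | cons K t ih =>
      intro dpf h p
      rw [List.foldl_cons]
      exact ih (fun j => pullRow r dpf K j) (fun j => pullRow_red r dpf K j) p

theorem RL (r : Nat) : ∀ (m : Nat) (counts : List Int) (dpf : Nat → Int),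
    counts.length ≤ m → (∀ p, dpf p % MD = dpf p) →
    runLoopB (r+1) MD (r:Int) (pascalTable r) ((List.range (r+1)).map dpf) counts
      = (List.range (r+1)).map (counts.foldl (fun f K => pullRow r f K) dpf) := by
  intro m
  induction m with
  | zero =>
      intro counts dpf hlen _
      have : counts = [] := List.eq_nil_of_length_eq_zero (by omega)
      subst this
      simp [runLoopB]
  | succ m ih =>
      intro counts dpf hlen hred
      cases counts with
      | nil => simp [runLoopB]
      | cons K rest =>
          rw [runLoopB]
          set t := (K :: rest).takeWhile (fun x => x == K) with ht
          set d := (K :: rest).dropWhile (fun x => x == K) with hd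
          have htrep : t = List.replicate t.length K := by
            rw [List.eq_replicate_iff]
            refine ⟨rfl, fun b hb => ?_⟩
            have := List.mem_takeWhile_imp hb
            simpa using this
          have htd : t ++ d = K :: rest := List.takeWhile_append_dropWhile
          have hdlen : d.length < (K :: rest).length := by
            rw [hd]
            simp only [List.dropWhile_cons, BEq.rfl, if_pos]
            exact Nat.lt_succ_of_le (List.length_dropWhile_le _ _)
          have hvp : vecmulB (r+1) MD ((List.range (r+1)).map dpf)
                (matpowB (r+1) MD (transferB (pascalTable r) MD (r:Int) (r+1) K)
                  (idMatB (r+1)) t.length)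
              = (List.range (r+1)).map (t.foldl (fun f K' => pullRow r f K') dpf) := by
            rw [tFun_spec, idF_spec, apPow (r+1) t.length dpf _ _, ← idF_spec,
              vid (r+1) dpf hred, ← tFun_spec, apStep r K t.length dpf, ← htrep]
          rw [hvp]
          rw [ih d (t.foldl (fun f K' => pullRow r f K') dpf)
            (by omega)
            (fun p => fold_red r t dpf hred p)]
          rw [← List.foldl_append, htd]

theorem cntB_spec (a : List (List Int)) (C0 : Nat) : cntBList a (C0 : Int)
    = (List.range C0).map (fun c => cS a c) := by
  unfold cntBList cS
  rw [pyRange0 C0, List.map_map]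
  apply List.map_congr_left
  intro c _
  simp only [Function.comp]
  congr 1
  apply List.map_congr_left
  intro row _
  rw [PySem.List.pyGetD_natCast]

theorem B_eq_spec' (a : List (List Int)) (h : Pre_solution a) :
    solution_alt a = dpIter a.length (cntS a) 0 := by
  obtain ⟨r0, tl, rfl⟩ : ∃ r0 tl, a = r0 :: tl := by
    cases a with
    | nil => exact absurd rfl h.1
    | cons x t => exact ⟨x, t, rfl⟩
  simp only [solution_alt]
  have hMD : (10:Int) ^ 7 + 19 = MD := rfl
  rw [hMD]
  have hC : PySem.List.pyGetD (r0 :: tl) 0 [] = r0 := by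
    simp [PySem.List.pyGetD_zero_cons]
  rw [hC, combB_spec ((r0 :: tl).length)]
  have hcnt : cntBList (r0 :: tl) ((r0.length : Nat) : Int)
      = (List.range r0.length).map (fun c => cS (r0 :: tl) c) := cntB_spec (r0 :: tl) r0.length
  rw [hcnt, init_vec ((r0 :: tl).length)]
  rw [RL ((r0 :: tl).length) ((List.range r0.length).map (fun c => cS (r0 :: tl) c)).length
    ((List.range r0.length).map (fun c => cS (r0 :: tl) c))
    (fun j => if j = 0 then (1:Int) else 0) le_rfl
    (fun p => by by_cases hp : p = 0 <;> simp [hp] <;> norm_num [MD])]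
  rw [mget _ ((r0 :: tl).length + 1) (0:Int) 0 le_rfl (by push_cast; omega)]
  simp only [Int.toNat_zero]
  rfl

-- A-side: comb table ----------------------------------------------------------

theorem zeros_vec (n : Nat) :
    List.replicate n (0:Int) = (List.range n).map (fun _ => (0:Int)) := by
  simp [List.map_const']

def padTable (r : Nat) : List (List Int) :=
  (List.range (r+1)).map (fun i => (List.range (r+1)).map (fun j => chS i j))

def combF (m t : Nat) (i j : Nat) : Int :=
  if i = m then (if j = 0 then (1:Int) else if j ≤ t then chS m j else 0)
  else if i < m then chS i j else 0

theorem combA_inner (r m : Nat) (hm : m ≤ r) (t : Nat) (ht : t ≤ m) :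
    ((List.range t).map (fun (k : Nat) => (1:Int) + (k:Int))).foldl (fun cb2 j =>
        s2 cb2 (m:Int) j (PySem.Int.mod (g2 cb2 ((m:Int)-1) (j-1) + g2 cb2 ((m:Int)-1) j) MD))
      ((List.range (r+1)).map (fun i => (List.range (r+1)).map (fun j => combF m 0 i j)))
    = (List.range (r+1)).map (fun i => (List.range (r+1)).map (fun j => combF m t i j)) := by
  induction t with
  | zero => simp
  | succ s ih =>
      have hs : s ≤ m := by omega
      have hm1 : 1 ≤ m := by omega
      have hsplit : (List.range (s+1)).map (fun (k : Nat) => (1:Int) + (k:Int))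
          = (List.range s).map (fun (k : Nat) => (1:Int) + (k:Int)) ++ [(1:Int) + (s:Int)] := by
        rw [List.range_succ (n := s)]
        simp
      rw [hsplit, List.foldl_append, ih hs]
      simp only [List.foldl_cons, List.foldl_nil]
      have hms : (m:Int) - 1 = ((m-1 : Nat) : Int) := by omega
      have e1 : (1:Int) + (s:Int) - 1 = ((s : Nat) : Int) := by omega
      have e2 : (1:Int) + (s:Int) = (((s+1) : Nat) : Int) := by push_cast; ring
      have hr : ∀ (u : Nat), u ≤ r →
          g2 ((List.range (r+1)).map (fun i => (List.range (r+1)).map (fun j => combF m s i j)))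
            ((m:Int)-1) ((u : Nat) : Int) = chS (m-1) u := by
        intro u hu
        unfold g2
        rw [hms, mget _ (r+1) _ [] (by positivity) (by push_cast; omega),
          mget _ (r+1) _ 0 (by positivity) (by push_cast; omega)]
        simp only [Int.toNat_natCast, combF]
        rw [if_neg (by omega), if_pos (by omega)]
      rw [e1, e2, hr s (by omega), hr (s+1) (by omega)]
      rw [PySem.Int.mod_eq_emod_of_pos MD_pos, chS_pascal (m-1) s]
      unfold s2
      have hmm : m - 1 + 1 = m := by omega
      have hss : s + 1 ≤ r + 1 := by omega
      rw [hmm]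
      rw [mget _ (r+1) ((m : Nat) : Int) [] (by positivity) (by push_cast; omega)]
      rw [mset _ (r+1) (((s+1) : Nat) : Int) _ (by positivity) (by push_cast; omega)]
      rw [mset _ (r+1) ((m : Nat) : Int) _ (by positivity) (by push_cast; omega)]
      have hcf : ∀ (t j : Nat), combF m t m j
          = if j = 0 then (1:Int) else if j ≤ t then chS m j else 0 := by
        intro t j
        unfold combF
        rw [if_pos rfl]
      apply List.map_congr_left
      intro i hi
      simp only [List.mem_range, Int.toNat_natCast] at *
      by_cases him : i = m
      · rw [if_pos him, him]
        apply List.map_congr_left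
        intro j hj
        simp only [List.mem_range] at hj
        by_cases hjs : j = s + 1
        · rw [if_pos hjs, hjs, hcf (s+1) (s+1),
            if_neg (by omega : ¬ (s+1 = 0)), if_pos (le_rfl)]
        · rw [if_neg hjs, hcf s j, hcf (s+1) j]
          by_cases hj0 : j = 0
          · rw [if_pos hj0, if_pos hj0]
          · rw [if_neg hj0, if_neg hj0]
            by_cases hjt : j ≤ s
            · rw [if_pos hjt, if_pos (by omega)]
            · rw [if_neg hjt, if_neg (by omega)]
      · rw [if_neg him]
        apply List.map_congr_left
        intro j _
        simp only [combF]
        simp only [if_neg him]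

theorem combA_fold (r : Nat) (m : Nat) (hm : m ≤ r + 1) :
    (List.range m).foldl (fun cb (i : Nat) =>
        (PySem.List.pyRange 1 ((i:Int)+1) 1).foldl (fun cb2 j =>
          s2 cb2 (i:Int) j (PySem.Int.mod (g2 cb2 ((i:Int)-1) (j-1) + g2 cb2 ((i:Int)-1) j) MD)) (s2 cb (i:Int) 0 1))
      ((List.range (r+1)).map (fun _ => (List.range (r+1)).map (fun _ => (0:Int))))
    = (List.range (r+1)).map (fun i => (List.range (r+1)).map (fun j =>
        if i < m then chS i j else 0)) := by
  induction m with
  | zero => simp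
  | succ n ih =>
      have hn : n ≤ r + 1 := by omega
      have hnr : n ≤ r := by omega
      rw [List.range_succ (n := n), List.foldl_append, ih hn, List.foldl_cons, List.foldl_nil]
      have hpy : PySem.List.pyRange 1 ((n:Int)+1) 1 = (List.range n).map (fun (k : Nat) => (1:Int) + (k:Int)) := by
        rw [PySem.List.pyRange_one]
        have h1 : ((n:Int) + 1 - 1).toNat = n := by omega
        rw [h1]
      simp only [hpy]
      have hcb1 : s2 ((List.range (r+1)).map (fun i => (List.range (r+1)).map (fun j =>
            if i < n then chS i j else 0))) (n:Int) 0 1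
          = (List.range (r+1)).map (fun i => (List.range (r+1)).map (fun j => combF n 0 i j)) := by
        unfold s2
        rw [mget _ (r+1) ((n : Nat) : Int) [] (by positivity) (by push_cast; omega),
          mset _ (r+1) (0:Int) _ le_rfl (by push_cast; omega),
          mset _ (r+1) ((n : Nat) : Int) _ (by positivity) (by push_cast; omega)]
        apply List.map_congr_left
        intro i hi
        simp only [List.mem_range, Int.toNat_natCast] at *
        have hcb : ∀ (j : Nat), combF n 0 n j
            = if j = 0 then (1:Int) else if j ≤ 0 then chS n j else 0 := by
          intro j
          unfold combF
          rw [if_pos rfl]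
        by_cases him : i = n
        · rw [if_pos him, him]
          apply List.map_congr_left
          intro j hj
          rw [hcb j]
          simp only [Int.toNat_zero]
          by_cases hj0 : j = 0
          · rw [if_pos hj0, if_pos hj0]
          · rw [if_neg hj0, if_neg hj0, if_neg (by omega), if_neg (by omega)]
        · rw [if_neg him]
          apply List.map_congr_left
          intro j _
          simp only [combF]
          simp only [if_neg him]
      rw [hcb1, combA_inner r n hnr n le_rfl]
      apply List.map_congr_left
      intro i hi
      simp only [List.mem_range] at hi
      apply List.map_congr_left
      intro j hj
      simp only [List.mem_range] at hj
      simp only [combF]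
      by_cases him : i = n
      · rw [if_pos him, him, if_pos (show n < n + 1 by omega)]
        by_cases hj0 : j = 0
        · rw [if_pos hj0, hj0, chS_zero]
        · rw [if_neg hj0]
          by_cases hjn : j ≤ n
          · rw [if_pos hjn]
          · rw [if_neg hjn, chS_high n j (by omega)]
      · rw [if_neg him]
        by_cases hin : i < n
        · rw [if_pos hin, if_pos (show i < n + 1 by omega)]
        · rw [if_neg hin, if_neg (show ¬ i < n + 1 by omega)]

theorem combA_spec (r : Nat) : combALoop MD ((r : Nat) : Int) = padTable r := by
  unfold combALoop
  have hc : ((r : Nat) : Int) + 1 = ((r+1 : Nat) : Int) := by push_cast; ring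
  have hz : (((r+1 : Nat) : Int)).toNat = r + 1 := by omega
  simp only [hc, pyRange0 (r+1), List.foldl_map, List.map_map, Function.comp_def, hz,
    zeros_vec (r+1)]
  rw [combA_fold r (r+1) le_rfl]
  unfold padTable
  apply List.map_congr_left
  intro i hi
  simp only [List.mem_range] at hi
  apply List.map_congr_left
  intro j _
  rw [if_pos (by omega : i < r + 1)]

-- A-side: column counts -------------------------------------------------------

def indF (row : List Int) (c : Nat) : Int := if row.getD c 0 == 1 then 1 else 0

theorem cS_append (x : List (List Int)) (row : List Int) (c : Nat) :
    cS (x ++ [row]) c = cS x c + indF row c := by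
  simp [cS, indF]

theorem cnt_inner (row : List Int) (C0 : Nat) (g : Nat → Int) (t : Nat) (ht : t ≤ C0) :
    ((List.range t).map (fun (k : Nat) => (k : Int))).foldl (fun cnt2 c =>
        if PySem.List.pyGetD row c 0 == 1 then
          PySem.List.pySetD cnt2 c (PySem.List.pyGetD cnt2 c 0 + 1) else cnt2)
      ((List.range C0).map g)
    = (List.range C0).map (fun c => if c < t then g c + indF row c else g c) := by
  induction t with
  | zero => simp
  | succ s ih =>
      have hs : s ≤ C0 := by omega
      have hsplit : (List.range (s+1)).map (fun (k : Nat) => (k : Int))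
          = (List.range s).map (fun (k : Nat) => (k : Int)) ++ [(s : Int)] := by
        rw [List.range_succ (n := s)]
        simp
      rw [hsplit, List.foldl_append, ih hs, List.foldl_cons, List.foldl_nil]
      have hget : PySem.List.pyGetD row ((s : Nat) : Int) 0 = row.getD s 0 :=
        PySem.List.pyGetD_natCast row s 0
      by_cases hone : (row.getD s 0 == 1) = true
      · rw [if_pos (by rw [hget]; exact hone)]
        rw [mget _ C0 ((s : Nat) : Int) 0 (by positivity) (by push_cast; omega),
          mset _ C0 ((s : Nat) : Int) _ (by positivity) (by push_cast; omega)]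
        apply List.map_congr_left
        intro c hc
        simp only [List.mem_range, Int.toNat_natCast] at *
        by_cases hcs : c = s
        · rw [if_pos hcs, hcs, if_neg (show ¬ s < s by omega),
            if_pos (show s < s + 1 by omega)]
          have hind : indF row s = 1 := by unfold indF; rw [if_pos hone]
          rw [hind]
        · rw [if_neg hcs]
          by_cases hct : c < s
          · rw [if_pos hct, if_pos (by omega)]
          · rw [if_neg hct, if_neg (by omega)]
      · rw [if_neg (by rw [hget]; exact hone)]
        apply List.map_congr_left
        intro c hc
        simp only [List.mem_range] at hc
        by_cases hcs : c = s
        · rw [hcs, if_neg (show ¬ s < s by omega), if_pos (show s < s + 1 by omega)]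
          have hind : indF row s = 0 := by unfold indF; rw [if_neg (by simpa using hone)]
          rw [hind, add_zero]
        · by_cases hct : c < s
          · rw [if_pos hct, if_pos (by omega)]
          · rw [if_neg hct, if_neg (by omega)]

theorem cnt_outer (a : List (List Int)) (C0 : Nat)
    (hlen : ∀ row ∈ a, C0 ≤ row.length) (m : Nat) (hm : m ≤ a.length) :
    (List.range m).foldl (fun cnt (rr : Nat) =>
        (PySem.List.pyRange 0 (C0 : Int) 1).foldl (fun cnt2 c =>
          if g2 a (rr : Int) c == 1 then
            PySem.List.pySetD cnt2 c (PySem.List.pyGetD cnt2 c 0 + 1) else cnt2) cnt)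
      ((List.range C0).map (fun _ => (0:Int)))
    = (List.range C0).map (fun c => cS (a.take m) c) := by
  induction m with
  | zero => simp [cS]
  | succ n ih =>
      have hn : n ≤ a.length := by omega
      have hna : n < a.length := by omega
      rw [List.range_succ (n := n), List.foldl_append, ih hn, List.foldl_cons, List.foldl_nil]
      have hrow : PySem.List.pyGetD a ((n : Nat) : Int) [] = a[n] := by
        rw [PySem.List.pyGetD_eq_getElem a [] (by positivity) (by push_cast; omega)]
        simp
      simp only [g2, hrow]
      rw [pyRange0 C0, List.foldl_map]
      have := cnt_inner a[n] C0 (fun c => cS (a.take n) c) C0 le_rfl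
      rw [List.foldl_map] at this
      rw [this]
      apply List.map_congr_left
      intro c hc
      simp only [List.mem_range] at hc
      rw [if_pos hc]
      have htake : a.take (n+1) = a.take n ++ [a[n]] := by
        rw [List.take_succ, List.getElem?_eq_getElem hna]
        rfl
      rw [htake, cS_append]

-- A-side: dp loop -------------------------------------------------------------

def xrow (comb : List (List Int)) (R K po pv : Int) : List Int → Int → List Int :=
  fun row x =>
    if x ≤ po ∧ K - x ≤ R - po then
      PySem.List.pySetD row (po - x + (K - x))
        (PySem.Int.mod (PySem.List.pyGetD row (po - x + (K - x)) 0
          + pv * PySem.Int.mod (g2 comb po x * g2 comb (R - po) (K - x)) MD) MD)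
    else row

def porow (comb : List (List Int)) (R K : Int) (prev : List Int) : List Int → Int → List Int :=
  fun row po =>
    if PySem.List.pyGetD prev po 0 == 0 then row
    else (PySem.List.pyRange 0 (K+1) 1).foldl (xrow comb R K po (PySem.List.pyGetD prev po 0)) row

theorem F1 (comb : List (List Int)) (R K po c : Int) (L : List Int) (T : List (List Int))
    (hc1 : 1 ≤ c) (hc2 : c < (T.length : Int)) :
    L.foldl (fun dp3 x =>
      if x ≤ po ∧ K - x ≤ R - po then
        s2 dp3 c (po - x + (K - x)) (PySem.Int.mod (g2 dp3 c (po - x + (K - x))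
          + g2 dp3 (c-1) po * PySem.Int.mod (g2 comb po x * g2 comb (R-po) (K-x)) MD) MD)
      else dp3) T
    = PySem.List.pySetD T c
        (L.foldl (xrow comb R K po (g2 T (c-1) po)) (PySem.List.pyGetD T c [])) := by
  induction L generalizing T with
  | nil =>
      rw [List.foldl_nil, List.foldl_nil, set_self T c [] (by omega) hc2]
  | cons x L' ih =>
      rw [List.foldl_cons, List.foldl_cons]
      by_cases hg : x ≤ po ∧ K - x ≤ R - po
      · rw [if_pos hg]
        have hlen : ((s2 T c (po - x + (K - x)) (PySem.Int.mod (g2 T c (po - x + (K - x))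
            + g2 T (c-1) po * PySem.Int.mod (g2 comb po x * g2 comb (R-po) (K-x)) MD) MD)).length : Int)
            = (T.length : Int) := by
          unfold s2
          rw [len_setD _ _ _ (by omega)]
        rw [ih _ (by rw [hlen]; exact hc2)]
        unfold s2
        have hprev : g2 (PySem.List.pySetD T c (PySem.List.pySetD (PySem.List.pyGetD T c [])
            (po - x + (K - x)) (PySem.Int.mod (g2 T c (po - x + (K - x))
              + g2 T (c-1) po * PySem.Int.mod (g2 comb po x * g2 comb (R-po) (K-x)) MD) MD)))
            (c-1) po = g2 T (c-1) po := by
          unfold g2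
          rw [getD_setD_int T c (c-1) _ [] (by omega) hc2 (by omega) (by omega),
            if_neg (by omega)]
        have hrowc : PySem.List.pyGetD (PySem.List.pySetD T c (PySem.List.pySetD
            (PySem.List.pyGetD T c []) (po - x + (K - x)) (PySem.Int.mod (g2 T c (po - x + (K - x))
              + g2 T (c-1) po * PySem.Int.mod (g2 comb po x * g2 comb (R-po) (K-x)) MD) MD))) c []
            = PySem.List.pySetD (PySem.List.pyGetD T c []) (po - x + (K - x))
              (PySem.Int.mod (g2 T c (po - x + (K - x))
                + g2 T (c-1) po * PySem.Int.mod (g2 comb po x * g2 comb (R-po) (K-x)) MD) MD) := by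
          rw [getD_setD_int T c c _ [] (by omega) hc2 (by omega) hc2, if_pos rfl]
        rw [hprev, hrowc, setD_setD T c _ _ (by omega)]
        congr 2
        unfold xrow
        rw [if_pos hg]
        rfl
      · rw [if_neg hg, ih _ hc2]
        congr 2
        unfold xrow
        rw [if_neg hg]

theorem F2 (comb : List (List Int)) (R K c : Int) (L : List Int) (T : List (List Int))
    (hc1 : 1 ≤ c) (hc2 : c < (T.length : Int)) :
    L.foldl (fun dp2 po =>
      if g2 dp2 (c-1) po == 0 then dp2
      else (PySem.List.pyRange 0 (K+1) 1).foldl (fun dp3 x =>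
        if x ≤ po ∧ K - x ≤ R - po then
          s2 dp3 c (po - x + (K - x)) (PySem.Int.mod (g2 dp3 c (po - x + (K - x))
            + g2 dp3 (c-1) po * PySem.Int.mod (g2 comb po x * g2 comb (R-po) (K-x)) MD) MD)
        else dp3) dp2) T
    = PySem.List.pySetD T c
        (L.foldl (porow comb R K (PySem.List.pyGetD T (c-1) [])) (PySem.List.pyGetD T c [])) := by
  induction L generalizing T with
  | nil =>
      rw [List.foldl_nil, List.foldl_nil, set_self T c [] (by omega) hc2]
  | cons po L' ih =>
      rw [List.foldl_cons, List.foldl_cons]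
      by_cases hz : (g2 T (c-1) po == 0) = true
      · rw [if_pos hz, ih T hc2]
        congr 2
        unfold porow
        rw [if_pos (by unfold g2 at hz; exact hz)]
      · rw [if_neg hz, F1 comb R K po c _ T hc1 hc2]
        have hlen2 : ((PySem.List.pySetD T c ((PySem.List.pyRange 0 (K+1) 1).foldl
            (xrow comb R K po (g2 T (c-1) po)) (PySem.List.pyGetD T c []))).length : Int)
            = (T.length : Int) := by
          rw [len_setD _ _ _ (by omega)]
        rw [ih _ (by rw [hlen2]; exact hc2)]
        have hprev2 : PySem.List.pyGetD (PySem.List.pySetD T c ((PySem.List.pyRange 0 (K+1) 1).foldl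
            (xrow comb R K po (g2 T (c-1) po)) (PySem.List.pyGetD T c []))) (c-1) []
            = PySem.List.pyGetD T (c-1) [] := by
          rw [getD_setD_int T c (c-1) _ [] (by omega) hc2 (by omega) (by omega),
            if_neg (by omega)]
        have hrowc2 : PySem.List.pyGetD (PySem.List.pySetD T c ((PySem.List.pyRange 0 (K+1) 1).foldl
            (xrow comb R K po (g2 T (c-1) po)) (PySem.List.pyGetD T c []))) c []
            = (PySem.List.pyRange 0 (K+1) 1).foldl
              (xrow comb R K po (g2 T (c-1) po)) (PySem.List.pyGetD T c []) := by
          rw [getD_setD_int T c c _ [] (by omega) hc2 (by omega) hc2, if_pos rfl]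
        rw [hprev2, hrowc2, setD_setD T c _ _ (by omega)]
        congr 2
        unfold porow
        rw [if_neg (by unfold g2 at hz; exact hz)]
        rfl

theorem XI (comb : List (List Int)) (r : Nat) (K po pv : Int)
    (hpo0 : 0 ≤ po) (hpor : po ≤ (r : Int))
    (L : List Int) (hL : ∀ x ∈ L, 0 ≤ x ∧ x ≤ K) (g : Nat → Int) :
    L.foldl (xrow comb (r : Int) K po pv) ((List.range (r+1)).map (fun j => g j % MD))
    = (List.range (r+1)).map (fun j => (g j
        + ((L.filter (fun x => decide (x ≤ po ∧ K - x ≤ (r : Int) - po)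
              && decide (po - x + (K - x) = ((j : Nat) : Int)))).map
            (fun x => pv * PySem.Int.mod (g2 comb po x * g2 comb ((r : Int) - po) (K - x)) MD)).sum) % MD) := by
  induction L generalizing g with
  | nil =>
      rw [List.foldl_nil]
      apply List.map_congr_left
      intro j _
      rw [List.filter_nil, List.map_nil, List.sum_nil, add_zero]
  | cons x L' ih =>
      rw [List.foldl_cons]
      have hx := hL x (by simp)
      by_cases hg : x ≤ po ∧ K - x ≤ (r : Int) - po
      · have hno0 : 0 ≤ po - x + (K - x) := by omega
        have hnor : po - x + (K - x) < ((r+1 : Nat) : Int) := by push_cast; omega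
        have hxrow : xrow comb (r : Int) K po pv ((List.range (r+1)).map (fun j => g j % MD)) x
            = (List.range (r+1)).map (fun j =>
                (if j = (po - x + (K - x)).toNat
                  then g (po - x + (K - x)).toNat + pv * PySem.Int.mod (g2 comb po x * g2 comb ((r : Int) - po) (K - x)) MD
                  else g j) % MD) := by
          unfold xrow
          rw [if_pos hg,
            mget _ (r+1) (po - x + (K - x)) 0 hno0 hnor,
            PySem.Int.mod_eq_emod_of_pos MD_pos, addl,
            mset _ (r+1) (po - x + (K - x)) _ hno0 hnor]
          apply List.map_congr_left
          intro j _
          by_cases hj : j = (po - x + (K - x)).toNat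
          · rw [if_pos hj, if_pos hj]
          · rw [if_neg hj, if_neg hj]
        rw [hxrow, ih (fun x hx' => hL x (by simp [hx'])) _]
        apply List.map_congr_left
        intro j hj
        simp only [List.mem_range] at hj
        by_cases hjn : j = (po - x + (K - x)).toNat
        · rw [if_pos hjn]
          rw [List.filter_cons_of_pos (by
            simp only [Bool.and_eq_true, decide_eq_true_eq]
            exact ⟨hg, by omega⟩)]
          rw [List.map_cons, List.sum_cons, hjn]
          ring_nf
        · rw [if_neg hjn]
          rw [List.filter_cons_of_neg (by
            simp only [Bool.and_eq_true, decide_eq_true_eq, not_and]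
            intro _
            omega)]
      · have hxrow : xrow comb (r : Int) K po pv ((List.range (r+1)).map (fun j => g j % MD)) x
            = (List.range (r+1)).map (fun j => g j % MD) := by
          unfold xrow
          rw [if_neg hg]
        rw [hxrow, ih (fun x hx' => hL x (by simp [hx'])) g]
        apply List.map_congr_left
        intro j _
        rw [List.filter_cons_of_neg (by
          simp only [Bool.and_eq_true, decide_eq_true_eq, not_and]
          intro h
          exact absurd h hg)]

def contribF (comb : List (List Int)) (r : Nat) (K : Int) (dpf : Nat → Int) (po : Int) (j : Nat) : Int :=
  (((PySem.List.pyRange 0 (K+1) 1).filter (fun x => decide (x ≤ po ∧ K - x ≤ (r : Int) - po)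
      && decide (po - x + (K - x) = ((j : Nat) : Int)))).map
    (fun x => dpf po.toNat * PySem.Int.mod (g2 comb po x * g2 comb ((r : Int) - po) (K - x)) MD)).sum

theorem RIL (comb : List (List Int)) (r : Nat) (K : Int) (dpf : Nat → Int)
    (L : List Int) (hL : ∀ po ∈ L, 0 ≤ po ∧ po ≤ (r : Int)) (g : Nat → Int) :
    L.foldl (porow comb (r : Int) K ((List.range (r+1)).map dpf))
        ((List.range (r+1)).map (fun j => g j % MD))
    = (List.range (r+1)).map (fun j =>
        (g j + (L.map (fun po => contribF comb r K dpf po j)).sum) % MD) := by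
  induction L generalizing g with
  | nil =>
      rw [List.foldl_nil]
      apply List.map_congr_left
      intro j _
      rw [List.map_nil, List.sum_nil, add_zero]
  | cons po L' ih =>
      rw [List.foldl_cons]
      have hpo := hL po (by simp)
      have hpv : PySem.List.pyGetD ((List.range (r+1)).map dpf) po 0 = dpf po.toNat :=
        mget dpf (r+1) po 0 hpo.1 (by push_cast; omega)
      by_cases hz : (dpf po.toNat == 0) = true
      · have hstep : porow comb (r : Int) K ((List.range (r+1)).map dpf)
            ((List.range (r+1)).map (fun j => g j % MD)) po
            = (List.range (r+1)).map (fun j => g j % MD) := by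
          unfold porow
          rw [hpv, if_pos hz]
        rw [hstep, ih (fun y hy => hL y (by simp [hy])) g]
        apply List.map_congr_left
        intro j _
        have hc0 : contribF comb r K dpf po j = 0 := by
          unfold contribF
          apply List.sum_eq_zero
          intro y hy
          rcases List.mem_map.1 hy with ⟨x, _, rfl⟩
          rw [show dpf po.toNat = 0 from by simpa using hz, zero_mul]
        rw [List.map_cons, List.sum_cons, hc0, zero_add]
      · have hstep : porow comb (r : Int) K ((List.range (r+1)).map dpf)
            ((List.range (r+1)).map (fun j => g j % MD)) po
            = (List.range (r+1)).map (fun j => (g j + contribF comb r K dpf po j) % MD) := by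
          unfold porow
          rw [hpv, if_neg hz,
            XI comb r K po (dpf po.toNat) hpo.1 hpo.2 _
              (fun x hx => by
                rcases PySem.List.mem_pyRange_one.1 hx with ⟨h1, h2⟩
                omega) g]
          rfl
        rw [hstep, ih (fun y hy => hL y (by simp [hy])) (fun j => g j + contribF comb r K dpf po j)]
        apply List.map_congr_left
        intro j _
        rw [List.map_cons, List.sum_cons, add_assoc]

theorem gpad (r : Nat) (n k : Int) (h0 : 0 ≤ n) (h1 : n ≤ (r : Int))
    (h2 : 0 ≤ k) (h3 : k < ((r+1 : Nat) : Int)) :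
    g2 (padTable r) n k = chS n.toNat k.toNat := by
  unfold g2 padTable
  rw [mget _ (r+1) n [] h0 (by push_cast; omega),
    mget _ (r+1) k 0 h2 h3]

theorem PC (r : Nat) (K : Int) (dpf : Nat → Int) (p j : Nat) (hp : p ≤ r) (hj : j ≤ r) :
    contribF (padTable r) r K dpf ((p : Nat) : Int) j % MD = pullT r dpf K j p % MD := by
  unfold contribF pullT
  by_cases hev : ((p : Int) + K - (j : Int)) % 2 = 0
  · have h2x : 2 * (((p : Int) + K - (j : Int)) / 2) = (p : Int) + K - (j : Int) := by omega
    rw [sum_filter_unique _ _ _ (((p : Int) + K - (j : Int)) / 2)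
      (PySem.List.nodup_pyRange_one 0 (K+1))
      (fun x _ hq => by
        simp only [Bool.and_eq_true, decide_eq_true_eq] at hq
        omega)]
    rw [if_pos hev]
    by_cases hc : ((p : Int) + K - (j : Int)) / 2 ∈ PySem.List.pyRange 0 (K+1) 1
        ∧ ((fun x => decide (x ≤ ((p : Nat) : Int) ∧ K - x ≤ (r : Int) - ((p : Nat) : Int))
            && decide (((p : Nat) : Int) - x + (K - x) = ((j : Nat) : Int)))
           (((p : Int) + K - (j : Int)) / 2)) = true
    · rw [if_pos hc]
      obtain ⟨hmem, hq⟩ := hc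
      rcases PySem.List.mem_pyRange_one.1 hmem with ⟨hx0, hx1⟩
      simp only [Bool.and_eq_true, decide_eq_true_eq] at hq
      obtain ⟨⟨hxa, hxb⟩, _⟩ := hq
      rw [gpad r _ _ (by omega) (by omega) hx0 (by push_cast; omega),
        gpad r _ _ (by omega) (by omega) (by omega) (by push_cast; omega),
        PySem.Int.mod_eq_emod_of_pos MD_pos, mull, Int.toNat_natCast]
      unfold chG
      rw [if_pos ⟨hx0, hxa⟩, if_pos (by constructor <;> omega), mul_assoc]
      norm_num
    · rw [if_neg hc]
      by_cases h1 : 0 ≤ ((p : Int) + K - (j : Int)) / 2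
      · by_cases h2 : ((p : Int) + K - (j : Int)) / 2 ≤ ((p : Nat) : Int)
        · by_cases h4 : 0 ≤ K - ((p : Int) + K - (j : Int)) / 2
          · by_cases h3 : K - ((p : Int) + K - (j : Int)) / 2 ≤ (r : Int) - ((p : Nat) : Int)
            · exfalso
              apply hc
              constructor
              · exact PySem.List.mem_pyRange_one.2 ⟨h1, by omega⟩
              · simp only [Bool.and_eq_true, decide_eq_true_eq]
                exact ⟨⟨h2, h3⟩, by omega⟩
            · unfold chG
              rw [if_pos ⟨h1, h2⟩, if_neg (fun hh => h3 hh.2), mul_zero]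
          · unfold chG
            rw [if_pos ⟨h1, h2⟩, if_neg (fun hh => h4 hh.1), mul_zero]
        · unfold chG
          rw [if_neg (fun hh => h2 hh.2), mul_zero, zero_mul]
      · unfold chG
        rw [if_neg (fun hh => h1 hh.1), mul_zero, zero_mul]
  · rw [if_neg hev]
    rw [List.filter_eq_nil_iff.2 (fun x _ => by
      simp only [Bool.and_eq_true, decide_eq_true_eq, not_and]
      intro _
      omega)]
    rw [List.map_nil, List.sum_nil]

theorem dpIter_take_succ (r : Nat) (Ks : List Int) (m : Nat) (hm : m < Ks.length) :
    dpIter r (Ks.take (m+1)) = pullRow r (dpIter r (Ks.take m)) Ks[m] := by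
  unfold dpIter
  rw [List.take_succ, List.getElem?_eq_getElem hm]
  rw [show (Ks.take m ++ (some Ks[m]).toList) = Ks.take m ++ [Ks[m]] from rfl]
  rw [List.foldl_append, List.foldl_cons, List.foldl_nil]

def tblF (r C0 : Nat) (f : Nat → Int) (m : Nat) : List (List Int) :=
  (List.range (C0+1)).map (fun c => (List.range (r+1)).map (fun j =>
    if c ≤ m then dpIter r (((List.range C0).map f).take c) j else 0))

theorem dpA_fold (r C0 : Nat) (f : Nat → Int) (m : Nat) (hm : m ≤ C0) :
    ((List.range m).map (fun k : Nat => (1:Int) + (k:Int))).foldl (fun dp c =>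
      (PySem.List.pyRange 0 ((r : Int)+1) 1).foldl (fun dp2 po =>
        if g2 dp2 (c-1) po == 0 then dp2
        else (PySem.List.pyRange 0 ((PySem.List.pyGetD ((List.range C0).map f) (c-1) 0)+1) 1).foldl (fun dp3 x =>
          if x ≤ po ∧ (PySem.List.pyGetD ((List.range C0).map f) (c-1) 0) - x ≤ (r : Int) - po then
            s2 dp3 c (po - x + ((PySem.List.pyGetD ((List.range C0).map f) (c-1) 0) - x))
              (PySem.Int.mod (g2 dp3 c (po - x + ((PySem.List.pyGetD ((List.range C0).map f) (c-1) 0) - x))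
                + g2 dp3 (c-1) po * PySem.Int.mod (g2 (padTable r) po x
                    * g2 (padTable r) ((r : Int)-po) ((PySem.List.pyGetD ((List.range C0).map f) (c-1) 0)-x)) MD) MD)
          else dp3) dp2) dp)
      (tblF r C0 f 0)
    = tblF r C0 f m := by
  induction m with
  | zero => simp
  | succ n ih =>
      have hn : n ≤ C0 := by omega
      have hsplit : (List.range (n+1)).map (fun (k : Nat) => (1:Int) + (k:Int))
          = (List.range n).map (fun (k : Nat) => (1:Int) + (k:Int)) ++ [(1:Int) + (n:Int)] := by
        rw [List.range_succ (n := n)]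
        simp
      rw [hsplit, List.foldl_append, ih hn, List.foldl_cons, List.foldl_nil]
      have hlen : ((tblF r C0 f n).length : Int) = ((C0+1 : Nat) : Int) := by
        unfold tblF
        simp
      rw [F2 (padTable r) (r : Int)
        (PySem.List.pyGetD ((List.range C0).map f) ((1:Int)+(n:Int)-1) 0)
        ((1:Int)+(n:Int)) _ (tblF r C0 f n) (by omega) (by rw [hlen]; push_cast; omega)]
      have hKidx : (1:Int)+(n:Int)-1 = ((n : Nat) : Int) := by omega
      have hK : PySem.List.pyGetD ((List.range C0).map f) ((1:Int)+(n:Int)-1) 0 = f n := by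
        rw [hKidx, mget f C0 _ 0 (by positivity) (by push_cast; omega)]
        norm_num
      have hprev : PySem.List.pyGetD (tblF r C0 f n) ((1:Int)+(n:Int)-1) []
          = (List.range (r+1)).map (fun j => dpIter r (((List.range C0).map f).take n) j) := by
        unfold tblF
        rw [hKidx, mget _ (C0+1) _ [] (by positivity) (by push_cast; omega)]
        simp only [Int.toNat_natCast]
        apply List.map_congr_left
        intro j _
        rw [if_pos (le_rfl)]
      have hcur : PySem.List.pyGetD (tblF r C0 f n) ((1:Int)+(n:Int)) []
          = (List.range (r+1)).map (fun j => (0:Int) % MD) := by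
        unfold tblF
        rw [show (1:Int)+(n:Int) = (((n+1) : Nat) : Int) from by push_cast; ring,
          mget _ (C0+1) _ [] (by positivity) (by push_cast; omega)]
        simp only [Int.toNat_natCast]
        apply List.map_congr_left
        intro j _
        rw [if_neg (by omega), Int.zero_emod]
      rw [hK, hprev, hcur,
        RIL (padTable r) r (f n) (fun j => dpIter r (((List.range C0).map f).take n) j)
          (PySem.List.pyRange 0 ((r : Int)+1) 1)
          (fun po hpo => by
            rcases PySem.List.mem_pyRange_one.1 hpo with ⟨h1, h2⟩
            omega)
          (fun _ => (0:Int))]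
      have hrow : (List.range (r+1)).map (fun j =>
          ((0:Int) + ((PySem.List.pyRange 0 ((r : Int)+1) 1).map
            (fun po => contribF (padTable r) r (f n)
              (fun j => dpIter r (((List.range C0).map f).take n) j) po j)).sum) % MD)
          = (List.range (r+1)).map (fun j =>
              pullRow r (dpIter r (((List.range C0).map f).take n)) (f n) j) := by
        apply List.map_congr_left
        intro j hj
        simp only [List.mem_range] at hj
        rw [zero_add]
        rw [show ((r : Int)+1) = (((r+1) : Nat) : Int) from by push_cast; ring,
          pyRange0 (r+1), List.map_map]
        unfold pullRow
        apply sum_mod_congr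
        intro p hp
        simp only [List.mem_range] at hp
        exact PC r (f n) (dpIter r (((List.range C0).map f).take n)) p j (by omega) (by omega)
      rw [hrow]
      have hpull : (List.range (r+1)).map (fun j =>
            pullRow r (dpIter r (((List.range C0).map f).take n)) (f n) j)
          = (List.range (r+1)).map (fun j =>
              dpIter r (((List.range C0).map f).take (n+1)) j) := by
        apply List.map_congr_left
        intro j _
        rw [dpIter_take_succ r _ n (by simp; omega)]
        congr 1
        simp
      rw [hpull]
      unfold tblF
      rw [mset _ (C0+1) ((1:Int)+(n:Int)) _ (by positivity) (by push_cast; omega)]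
      apply List.map_congr_left
      intro c hc
      simp only [List.mem_range] at hc
      have htn : ((1:Int)+(n:Int)).toNat = n + 1 := by omega
      rw [htn]
      by_cases hcn : c = n + 1
      · rw [if_pos hcn, hcn]
        apply List.map_congr_left
        intro j _
        rw [if_pos (le_rfl)]
      · rw [if_neg hcn]
        apply List.map_congr_left
        intro j _
        by_cases hcl : c ≤ n
        · rw [if_pos hcl, if_pos (by omega)]
        · rw [if_neg hcl, if_neg (by omega)]

theorem A_eq_spec (a : List (List Int)) (h : Pre_solution a) :
    solution a = dpIter a.length (cntS a) 0 := by
  obtain ⟨r0, tl, rfl⟩ : ∃ r0 tl, a = r0 :: tl := by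
    cases a with
    | nil => exact absurd rfl h.1
    | cons x t => exact ⟨x, t, rfl⟩
  simp only [solution]
  have hMD : (10:Int) ^ 7 + 19 = MD := rfl
  have hC : PySem.List.pyGetD (r0 :: tl) 0 [] = r0 := by
    simp [PySem.List.pyGetD_zero_cons]
  rw [hMD, hC]
  rw [combA_spec ((r0 :: tl).length)]
  have hcnt : cntALoop (r0 :: tl) (((r0 :: tl).length : Nat) : Int) ((r0.length : Nat) : Int)
      = (List.range r0.length).map (fun c => cS (r0 :: tl) c) := by
    unfold cntALoop
    rw [pyRange0 ((r0 :: tl).length), List.foldl_map,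
      show ((r0.length : Int)).toNat = r0.length from by omega,
      zeros_vec r0.length]
    have hlen : ∀ row ∈ (r0 :: tl), r0.length ≤ row.length := by
      intro row hrow
      simpa using h.2 row hrow
    rw [cnt_outer (r0 :: tl) r0.length hlen ((r0 :: tl).length) le_rfl, List.take_length]
  rw [hcnt]
  unfold dpALoop
  have hpy1 : PySem.List.pyRange 1 (((r0.length : Nat) : Int)+1) 1
      = (List.range r0.length).map (fun (k : Nat) => (1:Int) + (k:Int)) := by
    rw [PySem.List.pyRange_one]
    have h1 : (((r0.length : Nat) : Int) + 1 - 1).toNat = r0.length := by omega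
    rw [h1]
  rw [hpy1]
  have hinit : s2 ((PySem.List.pyRange 0 (((r0.length : Nat) : Int)+1) 1).map
        (fun _ => List.replicate ((((r0 :: tl).length : Nat) : Int)+1).toNat (0:Int))) 0 0 1
      = tblF ((r0 :: tl).length) r0.length (fun c => cS (r0 :: tl) c) 0 := by
    rw [show (((r0.length : Nat) : Int)+1) = (((r0.length + 1) : Nat) : Int) from by push_cast; ring,
      pyRange0 (r0.length + 1), List.map_map]
    have hz2 : ((((r0 :: tl).length : Nat) : Int)+1).toNat = (r0 :: tl).length + 1 := by omega
    simp only [Function.comp_def, hz2, zeros_vec ((r0 :: tl).length + 1)]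
    unfold s2
    rw [mget _ (r0.length + 1) 0 [] le_rfl (by push_cast; omega),
      mset _ ((r0 :: tl).length + 1) (0:Int) _ le_rfl (by push_cast; omega),
      mset _ (r0.length + 1) (0:Int) _ le_rfl (by push_cast; omega)]
    unfold tblF
    apply List.map_congr_left
    intro c hc
    simp only [List.mem_range, Int.toNat_zero] at *
    by_cases hc0 : c = 0
    · rw [if_pos hc0, hc0]
      apply List.map_congr_left
      intro j _
      rw [if_pos (le_rfl)]
      unfold dpIter
      rw [List.take_zero, List.foldl_nil]
      rfl
    · rw [if_neg hc0]
      apply List.map_congr_left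
      intro j _
      rw [if_neg (by omega)]
  rw [hinit]
  rw [dpA_fold ((r0 :: tl).length) r0.length (fun c => cS (r0 :: tl) c) r0.length le_rfl]
  unfold tblF g2
  rw [mget _ (r0.length+1) ((r0.length : Nat) : Int) [] (by positivity) (by push_cast; omega)]
  simp only [Int.toNat_natCast]
  rw [mget _ (((r0 :: tl).length)+1) (0:Int) 0 le_rfl (by push_cast; omega)]
  simp only [Int.toNat_zero]
  rw [if_pos (le_rfl), List.take_of_length_le (by simp)]
  rfl

-- ===== VERDICT (by name: the statement is the Claim_ definition above) =====
theorem solution_spec : Claim_equal_solution := by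
  intro a _ hpre
  unfold Spec_solution
  rw [A_eq_spec a hpre, B_eq_spec' a hpre]
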